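-- pv_equiv track=rewrite | github.com/saprative/sig_test | test2.py | routeGrid
-- ===== SOURCE A (Python) =====
-- R = 3
--
-- C = 3
--
-- def zeros(longint):
--     manipulandum = str(longint)
--     return len(manipulandum)-len(manipulandum.rstrip('0'))
--
-- def more_0_right(rightint,downint):
--     if zeros(rightint) == zeros(downint):
--         return True
--     else:
--         return False
--
-- def routeGrid(a, m, n):
--
--     # Instead of following line, we can use int tc[m+1][n+1] or
--     # dynamically allocate memoery to save space. The following
--     # line is used to keep te program simple and make it working
--     # on all compilers.
--     tc = [[0 for x in range(C)] for x in range(R)]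
--
--     tc[0][0] = a[0][0]
--
--     # Initialize first column of total cost(tc) array
--     for i in range(1, m):
--         tc[i][0] = tc[i-1][0] * a[i][0]
--
--     # Initialize first row of tc array
--     for j in range(1, n):
--         tc[0][j] = tc[0][j-1] * a[0][j]
--
--     # Construct rest of the tc array
--     for i in range(1, m):
--         for j in range(1, n):
--             tc[i][j] = more_0_right(tc[i-1][j], tc[i][j-1]) * a[i][j]
--
--     return tc
-- ===== SOURCE B (Python) =====
-- def routeGrid(a, m, n):
--     def zeros(x):
--         s = str(x)
--         return len(s) - len(s.rstrip('0'))
--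
--     def cell(i, j):
--         if i == 0 and j == 0:
--             return a[0][0]
--         if j == 0:
--             return cell(i - 1, 0) * a[i][0]
--         if i == 0:
--             return cell(0, j - 1) * a[0][j]
--         return (zeros(cell(i - 1, j)) == zeros(cell(i, j - 1))) * a[i][j]
--
--     tc = [[0] * 3 for _ in range(3)]
--     tc[0][0] = cell(0, 0)
--     for j in range(1, n):
--         tc[0][j] = cell(0, j)
--     for i in range(1, m):
--         tc[i][0] = cell(i, 0)
--         for j in range(1, n):
--             tc[i][j] = cell(i, j)
--     return tc
-- ===== Notes on version B (the rewrite author's own statement) =====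
-- stated objective: alternative
-- what changed: Replaces A's bottom-up DP that reads its own partially-filled grid (tc[i-1][j], tc[i][j-1]) by a pure top-down recursive cell(i,j) function, so each written entry is computed by structural recursion on the indices instead of from mutated grid state.
import Mathlib
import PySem

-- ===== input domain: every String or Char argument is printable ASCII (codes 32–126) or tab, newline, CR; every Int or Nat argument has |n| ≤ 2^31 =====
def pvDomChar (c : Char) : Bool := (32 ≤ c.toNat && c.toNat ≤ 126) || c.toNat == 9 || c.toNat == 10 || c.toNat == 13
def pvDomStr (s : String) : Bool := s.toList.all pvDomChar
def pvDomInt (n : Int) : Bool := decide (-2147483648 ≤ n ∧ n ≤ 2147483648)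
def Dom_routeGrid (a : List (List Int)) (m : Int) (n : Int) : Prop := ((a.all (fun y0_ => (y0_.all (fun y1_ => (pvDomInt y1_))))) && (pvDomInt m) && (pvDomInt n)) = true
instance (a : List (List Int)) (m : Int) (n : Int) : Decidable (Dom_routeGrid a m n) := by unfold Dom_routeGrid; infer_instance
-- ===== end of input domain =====

-- B replaces A's bottom-up DP reading its own partially-filled grid by a pure top-down
-- recursive cell(i,j) function, each entry computed by recursion on the indices
-- (objective: alternative decomposition; same cost).

-- ===== PORT A =====

-- zeros(x): trailing-'0' count of str(x); s.rstrip('0') is ported by hand on List Char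
-- (drop trailing '0' from the reversed list) — exact for every decimal string.
def zerosFn (x : Int) : Int :=
  let s := PySem.Int.toChars x
  let r := (s.reverse.dropWhile (fun c => c == '0')).reverse
  (s.length : Int) - (r.length : Int)

def more0Right (rightint : Int) (downint : Int) : Bool :=
  if zerosFn rightint = zerosFn downint then true else false

-- a[i][j] read; under Pre_ the indices are in range, so the default is never taken.
def pyGet2 (a : List (List Int)) (i j : Int) : Int :=
  PySem.List.pyGetD (PySem.List.pyGetD a i ([] : List Int)) j 0

-- tc[i][j] = v; under Pre_ the indices are nonnegative and in range.
def pySet2 (g : List (List Int)) (i j : Int) (v : Int) : List (List Int) :=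
  g.set i.toNat ((g.getD i.toNat []).set j.toNat v)

def routeGrid (a : List (List Int)) (m : Int) (n : Int) : List (List Int) :=
  let tc := (PySem.List.pyRange 0 3 1).map (fun _ => (PySem.List.pyRange 0 3 1).map (fun _ => (0 : Int)))
  let tc := pySet2 tc 0 0 (pyGet2 a 0 0)
  let tc := (PySem.List.pyRange 1 m 1).foldl (fun tc i => pySet2 tc i 0 (pyGet2 tc (i-1) 0 * pyGet2 a i 0)) tc
  let tc := (PySem.List.pyRange 1 n 1).foldl (fun tc j => pySet2 tc 0 j (pyGet2 tc 0 (j-1) * pyGet2 a 0 j)) tc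
  (PySem.List.pyRange 1 m 1).foldl (fun tc i =>
    (PySem.List.pyRange 1 n 1).foldl (fun tc j =>
      pySet2 tc i j ((if more0Right (pyGet2 tc (i-1) j) (pyGet2 tc i (j-1)) then 1 else 0) * pyGet2 a i j)) tc) tc

-- ===== PORT B =====

-- cell(i, j) of Source B, as structural recursion on the (nonnegative) indices
def cellB (a : List (List Int)) : Nat → Nat → Int
  | 0, 0 => pyGet2 a 0 0
  | i+1, 0 => cellB a i 0 * pyGet2 a ((i : Int) + 1) 0
  | 0, j+1 => cellB a 0 j * pyGet2 a 0 ((j : Int) + 1)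
  | i+1, j+1 =>
      (if zerosFn (cellB a i (j+1)) = zerosFn (cellB a (i+1) j) then 1 else 0) * pyGet2 a ((i : Int) + 1) ((j : Int) + 1)

def routeGrid_alt (a : List (List Int)) (m : Int) (n : Int) : List (List Int) :=
  let tc := List.replicate 3 (List.replicate 3 (0 : Int))
  let tc := pySet2 tc 0 0 (cellB a 0 0)
  let tc := (PySem.List.pyRange 1 n 1).foldl (fun tc j => pySet2 tc 0 j (cellB a 0 j.toNat)) tc
  (PySem.List.pyRange 1 m 1).foldl (fun tc i =>
    let tc := pySet2 tc i 0 (cellB a i.toNat 0)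
    (PySem.List.pyRange 1 n 1).foldl (fun tc j => pySet2 tc i j (cellB a i.toNat j.toNat)) tc) tc

-- ===== PRECONDITION & SPEC =====
-- Pre_ excludes exactly the inputs where A raises IndexError: m or n above the fixed 3x3
-- grid size, or a lacking the accessed max(m,1) × max(n,1) rectangle of entries.
def Pre_routeGrid (a : List (List Int)) (m : Int) (n : Int) : Prop :=
  m ≤ 3 ∧ n ≤ 3 ∧ max m.toNat 1 ≤ a.length ∧ ∀ i < max m.toNat 1, max n.toNat 1 ≤ (a.getD i []).length
instance (a : List (List Int)) (m : Int) (n : Int) : Decidable (Pre_routeGrid a m n) := by unfold Pre_routeGrid; infer_instance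

def pvWitness_routeGrid : List (List Int) × Int × Int := ([[2, 30], [4, 5]], 2, 2)

def Spec_routeGrid (a : List (List Int)) (m : Int) (n : Int) (out : List (List Int)) : Prop := out = routeGrid_alt a m n
instance (a : List (List Int)) (m : Int) (n : Int) (out : List (List Int)) : Decidable (Spec_routeGrid a m n out) := by unfold Spec_routeGrid; infer_instance

-- ===== CLAIM (what is proved, stated in full; the proofs are below) =====
def Claim_equal_routeGrid : Prop := ∀ (a : List (List Int)) (m : Int) (n : Int), Dom_routeGrid a m n → Pre_routeGrid a m n → Spec_routeGrid a m n (routeGrid a m n)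

-- ===== LEMMAS AND PROOFS =====

-- ===== VERDICT (by name: the statement is the Claim_ definition above) =====
set_option maxHeartbeats 2000000 in
theorem routeGrid_spec : Claim_equal_routeGrid := by
  intro a m n _hDom hPre
  obtain ⟨hm3, hn3, -, -⟩ := hPre
  show routeGrid a m n = routeGrid_alt a m n
  have hr03 : PySem.List.pyRange 0 3 1 = [0, 1, 2] := by decide
  have hr12 : PySem.List.pyRange 1 2 1 = [1] := by decide
  have hr13 : PySem.List.pyRange 1 3 1 = [1, 2] := by decide
  rcases (show m ≤ 1 ∨ m = 2 ∨ m = 3 by omega) with hm | hm | hm <;>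
    rcases (show n ≤ 1 ∨ n = 2 ∨ n = 3 by omega) with hn | hn | hn <;>
    try subst hm <;> try subst hn
  all_goals
    try (have hm1 : PySem.List.pyRange 1 m 1 = [] := PySem.List.pyRange_one_eq_nil (by omega))
  all_goals
    try (have hn1 : PySem.List.pyRange 1 n 1 = [] := PySem.List.pyRange_one_eq_nil (by omega))
  all_goals
    simp [routeGrid, routeGrid_alt, hr03, hr12, hr13,
          pySet2, pyGet2, more0Right, cellB, List.foldl, List.replicate,
          PySem.List.pyGetD_ofNat', *]
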